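-- pv_equiv track=rewrite | github.com/Anders-Stubberud/TDT4120 | øving_4/radix_sort.py | counting_sort_tweaked
-- ===== SOURCE A (Python) =====
-- def char_to_int(char):
--     return ord(char) - 97
--
-- def counting_sort_tweaked(A, n, index_in_word):
--     res = [None] * n
--     #27 plasser gir plass til 26 bokstaver (a-z), og en plass til ordene som ikke hadde noe på index'en
--     counter = [0] * 27
--     for i in range(n):
--         value = 0
--         if len(A[i]) >= index_in_word + 1:
--             value = char_to_int(A[i][index_in_word]) + 1
--         counter[value] += 1
--     for i in range(1, len(counter)):
--         counter[i] += counter[i-1]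
--     for i in range(n-1, -1, -1):
--         value = 0
--         if len(A[i]) >= index_in_word + 1:
--             value = char_to_int(A[i][index_in_word]) + 1
--         res[counter[value] - 1] = A[i]
--         counter[value] -= 1
--     return res
-- ===== SOURCE B (Python) =====
-- def char_to_int(char):
--     return ord(char) - 97
--
-- def counting_sort_tweaked(A, n, index_in_word):
--     # Bucket sort: one forward pass into 27 buckets, then concatenate them in order.
--     buckets = [[] for _ in range(27)]
--     for i in range(n):
--         word = A[i]
--         value = 0
--         if len(word) >= index_in_word + 1:
--             value = char_to_int(word[index_in_word]) + 1
--         buckets[value].append(word)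
--     res = []
--     for b in buckets:
--         res += b
--     return res
-- ===== Notes on version B (the rewrite author's own statement) =====
-- stated objective: alternative
-- what changed: Replaces the three-pass counting sort (count array, prefix sums, reverse placement into a preallocated result) by a one-forward-pass bucket sort into 27 lists concatenated in order; Pre_ excludes only inputs where A raises (n > len(A), an out-of-range character access, or a character whose bucket index is outside Python's [-27,26] wrap range), and B raises on exactly those too.
import Mathlib
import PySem

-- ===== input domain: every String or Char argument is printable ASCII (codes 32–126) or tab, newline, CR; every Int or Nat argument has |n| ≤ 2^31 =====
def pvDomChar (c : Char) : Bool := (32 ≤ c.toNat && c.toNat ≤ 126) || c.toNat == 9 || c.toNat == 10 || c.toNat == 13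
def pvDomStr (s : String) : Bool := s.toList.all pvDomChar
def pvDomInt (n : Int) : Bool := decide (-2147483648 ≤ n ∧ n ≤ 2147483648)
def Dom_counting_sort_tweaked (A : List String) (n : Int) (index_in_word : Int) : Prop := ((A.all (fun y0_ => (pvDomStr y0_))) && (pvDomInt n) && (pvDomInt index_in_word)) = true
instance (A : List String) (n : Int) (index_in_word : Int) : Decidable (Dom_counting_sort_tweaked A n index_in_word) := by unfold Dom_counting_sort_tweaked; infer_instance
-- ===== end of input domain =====

-- B replaces A's three-pass counting sort by a one-pass bucket sort into 27 lists concatenated in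
-- order (alternative decomposition, same cost); proved equal wherever the Python A returns.

-- ===== PORT A =====

-- char_to_int(char) = ord(char) - 97
def charToInt (c : Char) : Int := (c.toNat : Int) - 97

-- 'value' as both Pythons compute it for a word:
-- value = 0; if len(w) >= index_in_word + 1: value = char_to_int(w[index_in_word]) + 1.
-- w[index_in_word] is PySem.Str.pyGet?; the .getD ' ' default is only reached where Python
-- raises IndexError, which Pre_ excludes.
def csValue (index_in_word : Int) (w : String) : Int :=
  if PySem.Str.len w ≥ index_in_word + 1 then
    charToInt ((PySem.Str.pyGet? w index_in_word).getD ' ') + 1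
  else 0

-- Port of A. res = [None] * n is modelled as replicate "" : whenever the Python returns (Pre_),
-- every slot is overwritten, so None is never observable. pySetD/pyGetD are total forms, exact
-- under Pre_ (Python raises exactly where the optional primitives would give none).
def counting_sort_tweaked (A : List String) (n : Int) (index_in_word : Int) : List String :=
  let res : List String := List.replicate n.toNat ""
  let counter : List Int := List.replicate 27 0
  let counter := (PySem.List.pyRange 0 n 1).foldl (fun c i =>
      let v := csValue index_in_word (PySem.List.pyGetD A i "")
      PySem.List.pySetD c v (PySem.List.pyGetD c v 0 + 1)) counter
  let counter := (PySem.List.pyRange 1 27 1).foldl (fun c i =>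
      PySem.List.pySetD c i (PySem.List.pyGetD c i 0 + PySem.List.pyGetD c (i - 1) 0)) counter
  let st := (PySem.List.pyRange (n - 1) (-1) (-1)).foldl (fun (st : List String × List Int) i =>
      let w := PySem.List.pyGetD A i ""
      let v := csValue index_in_word w
      (PySem.List.pySetD st.1 (PySem.List.pyGetD st.2 v 0 - 1) w,
       PySem.List.pySetD st.2 v (PySem.List.pyGetD st.2 v 0 - 1))) (res, counter)
  st.1

-- ===== PORT B =====
def counting_sort_tweaked_alt (A : List String) (n : Int) (index_in_word : Int) : List String :=
  let buckets : List (List String) := (PySem.List.pyRange 0 27 1).map (fun _ => ([] : List String))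
  let buckets := (PySem.List.pyRange 0 n 1).foldl (fun bs i =>
      let w := PySem.List.pyGetD A i ""
      let v := csValue index_in_word w
      PySem.List.pySetD bs v (PySem.List.pyGetD bs v [] ++ [w])) buckets
  buckets.foldl (fun r b => r ++ b) []

-- ===== PRECONDITION & SPEC =====
-- Pre_ excludes exactly the inputs where the Python A raises: n > len(A) (IndexError on A[i]),
-- a word whose indexed character access w[index_in_word] is out of range, and an accessed
-- character with code outside 69..122, whose bucket index falls outside Python's [-27, 26]
-- wrap range for a 27-slot list (IndexError on counter[value]).
def Pre_counting_sort_tweaked (A : List String) (n : Int) (index_in_word : Int) : Prop :=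
  n ≤ (A.length : Int) ∧
  ∀ w ∈ A.take n.toNat, PySem.Str.len w ≥ index_in_word + 1 →
    ((PySem.Str.pyGet? w index_in_word).any (fun c => 69 ≤ c.toNat && c.toNat ≤ 122)) = true
instance (A : List String) (n : Int) (index_in_word : Int) : Decidable (Pre_counting_sort_tweaked A n index_in_word) := by unfold Pre_counting_sort_tweaked; infer_instance

def pvWitness_counting_sort_tweaked : List String × Int × Int := (["ba", "ab", "b", "Fz"], 4, 1)

def Spec_counting_sort_tweaked (A : List String) (n : Int) (index_in_word : Int) (out : List String) : Prop := out = counting_sort_tweaked_alt A n index_in_word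
instance (A : List String) (n : Int) (index_in_word : Int) (out : List String) : Decidable (Spec_counting_sort_tweaked A n index_in_word out) := by unfold Spec_counting_sort_tweaked; infer_instance

-- ===== CLAIM (what is proved, stated in full; the proofs are below) =====
def Claim_equal_counting_sort_tweaked : Prop := ∀ (A : List String) (n : Int) (index_in_word : Int), Dom_counting_sort_tweaked A n index_in_word → Pre_counting_sort_tweaked A n index_in_word → Spec_counting_sort_tweaked A n index_in_word (counting_sort_tweaked A n index_in_word)

-- ===== LEMMAS AND PROOFS =====

def ek (index_in_word : Int) (w : String) : Nat := ((csValue index_in_word w) % 27).toNat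

def bktF (k : String → Nat) (L : List String) (v : Nat) : List String := L.filter (fun w => k w == v)

def cntF (k : String → Nat) (L : List String) (v : Nat) : Nat := L.countP (fun w => k w == v)

def belowF (k : String → Nat) (L : List String) (v : Nat) : Nat := L.countP (fun w => decide (k w < v))

def cumF (k : String → Nat) (L : List String) (v : Nat) : Nat := L.countP (fun w => decide (k w ≤ v))

def owr (r : List String) (s : Nat) (seg : List String) : List String :=
  r.take s ++ seg ++ r.drop (s + seg.length)

def ansL (k : String → Nat) (M : List String) (B : Nat → Nat) : List Nat → List String → List String
  | [], r => r
  | v :: vs, r => ansL k M B vs (owr r (B v) (bktF k M v))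

theorem pyGetD_emod {α : Type} (xs : List α) (h27 : xs.length = 27) (v : Int)
    (hv : -27 ≤ v ∧ v < 27) (d : α) :
    PySem.List.pyGetD xs v d = xs.getD (v % 27).toNat d := by
  unfold PySem.List.pyGetD PySem.List.pyGet? PySem.List.pyIdx?
  rw [h27]
  by_cases h0 : 0 ≤ v
  · rw [if_pos h0, if_pos (by push_cast; omega)]
    have h : (v % 27).toNat = v.toNat := by omega
    simp [List.getD, h]
  · rw [if_neg h0, if_pos (by push_cast; omega)]
    have h : (v % 27).toNat = 27 - (-v).toNat := by omega
    simp [List.getD, h]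

theorem pySetD_emod {α : Type} (xs : List α) (h27 : xs.length = 27) (v : Int)
    (hv : -27 ≤ v ∧ v < 27) (x : α) :
    PySem.List.pySetD xs v x = xs.set (v % 27).toNat x := by
  unfold PySem.List.pySetD PySem.List.pySet? PySem.List.pyIdx?
  rw [h27]
  by_cases h0 : 0 ≤ v
  · rw [if_pos h0, if_pos (by push_cast; omega)]
    have h : (v % 27).toNat = v.toNat := by omega
    simp [h]
  · rw [if_neg h0, if_pos (by push_cast; omega)]
    have h : (v % 27).toNat = 27 - (-v).toNat := by omega
    simp [h]

theorem ek_lt_27 (idx : Int) (w : String) : ek idx w < 27 := by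
  unfold ek
  have h1 := Int.emod_lt_of_pos (csValue idx w) (b := 27) (by norm_num)
  have h2 := Int.emod_nonneg (csValue idx w) (b := 27) (by norm_num)
  omega

theorem csValue_bounds_of_pre (idx : Int) (w : String)
    (h : PySem.Str.len w ≥ idx + 1 →
      ((PySem.Str.pyGet? w idx).any (fun c => 69 ≤ c.toNat && c.toNat ≤ 122)) = true) :
    -27 ≤ csValue idx w ∧ csValue idx w < 27 := by
  unfold csValue charToInt
  split_ifs with hl
  · have h2 := h hl
    rcases hc : PySem.Str.pyGet? w idx with _ | c
    · rw [hc] at h2; simp at h2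
    · rw [hc] at h2
      simp only [Option.any_some, Bool.and_eq_true, decide_eq_true_eq] at h2
      simp only [Option.getD_some]
      omega
  · norm_num

theorem getD_map_range' {α : Type} (g : Nat → α) (N j : Nat) (hj : j < N) (d : α) :
    (((List.range N).map g).getD j d) = g j := by
  rw [List.getD_eq_getElem _ _ (by simpa using hj)]
  simp

theorem set_map_range {α : Type} (g : Nat → α) (N j : Nat) (x : α) :
    ((List.range N).map g).set j x
      = (List.range N).map (fun v => if v = j then x else g v) := by
  apply List.ext_getElem (by simp)
  intro i h1 h2
  simp only [List.getElem_set, List.getElem_map, List.getElem_range]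
  by_cases hij : j = i
  · subst hij; simp
  · rw [if_neg hij, if_neg (fun h => hij h.symm)]

theorem aux_fwd {α β : Type} (A : List α) (d : α) (f : β → α → β) :
    ∀ (m : Nat), m ≤ A.length → ∀ (init : β),
    (List.range m).foldl (fun acc k => f acc (A.getD k d)) init = (A.take m).foldl f init := by
  intro m
  induction m with
  | zero => simp
  | succ m ih =>
    intro hm init
    have h : A[m]? = some A[m] := List.getElem?_eq_getElem (by omega)
    rw [List.range_succ, List.foldl_append, ih (by omega), List.take_add_one, h,
        Option.toList_some, List.foldl_append]
    show f _ (A.getD m d) = f _ _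
    rw [List.getD_eq_getElem A d (n := m) (by omega)]
    rfl

theorem aux_rev {α β : Type} (A : List α) (d : α) (f : β → α → β) :
    ∀ (m : Nat), m ≤ A.length → ∀ (init : β),
    (List.range m).reverse.foldl (fun acc k => f acc (A.getD k d)) init
      = ((A.take m).reverse).foldl f init := by
  intro m
  induction m with
  | zero => simp
  | succ m ih =>
    intro hm init
    have h : A[m]? = some A[m] := List.getElem?_eq_getElem (by omega)
    rw [List.range_succ, List.reverse_append, List.take_add_one, h]
    simp only [ List.reverse_singleton, Option.toList_some, List.reverse_append,
      List.foldl_cons, List.singleton_append]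
    rw [ih (by omega)]
    simp [h]

theorem foldl_pyRange_take {α β : Type} (A : List α) (n : Int) (hn : n ≤ (A.length : Int))
    (f : β → α → β) (d : α) (init : β) :
    (PySem.List.pyRange 0 n 1).foldl (fun acc i => f acc (PySem.List.pyGetD A i d)) init
      = (A.take n.toNat).foldl f init := by
  rw [PySem.List.pyRange_one, List.foldl_map]
  simp only [zero_add, Int.sub_zero, PySem.List.pyGetD_natCast]
  exact aux_fwd A d f n.toNat (by omega) init

theorem foldl_pyRange_rev_take {α β : Type} (A : List α) (n : Int) (hn : n ≤ (A.length : Int))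
    (f : β → α → β) (d : α) (init : β) :
    (PySem.List.pyRange (n - 1) (-1) (-1)).foldl (fun acc i => f acc (PySem.List.pyGetD A i d)) init
      = ((A.take n.toNat).reverse).foldl f init := by
  have h : PySem.List.pyRange (n - 1) (-1) (-1) = (PySem.List.pyRange 0 n 1).reverse := by
    rw [PySem.List.pyRange_neg_one_eq_reverse]; norm_num
  rw [h, PySem.List.pyRange_one, ← List.map_reverse, List.foldl_map]
  simp only [zero_add, Int.sub_zero, PySem.List.pyGetD_natCast]
  exact aux_rev A d f n.toNat (by omega) init

theorem below_add_cnt (k : String → Nat) (L : List String) (v : Nat) :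
    belowF k L v + cntF k L v = cumF k L v := by
  induction L with
  | nil => rfl
  | cons w t ih =>
    simp only [belowF, cntF, cumF, List.countP_cons] at *
    by_cases h1 : k w < v <;> by_cases h2 : k w = v <;> by_cases h3 : k w ≤ v <;>
      simp [h1, h2, h3] <;> omega

theorem cumF_le_len (k : String → Nat) (L : List String) (v : Nat) :
    cumF k L v ≤ L.length := List.countP_le_length

theorem belowF_zero (k : String → Nat) (L : List String) : belowF k L 0 = 0 := by
  simp [belowF]

theorem cumF_pred (k : String → Nat) (L : List String) (t : Nat) (ht : 1 ≤ t) :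
    cumF k L t = cumF k L (t - 1) + cntF k L t := by
  induction L with
  | nil => rfl
  | cons w s ih =>
    simp only [cumF, cntF, List.countP_cons] at *
    have h4 : ¬ (t ≤ t - 1) := by omega
    by_cases h1 : k w ≤ t - 1 <;> by_cases h2 : k w = t <;> by_cases h3 : k w ≤ t <;>
      simp [h1, h2, h3, h4] <;> omega

theorem ansL_nil_bkt (k : String → Nat) (B : Nat → Nat) :
    ∀ (vs : List Nat) (r : List String), ansL k [] B vs r = r := by
  intro vs
  induction vs with
  | nil => intro r; rfl
  | cons v vs ih =>
    intro r
    show ansL k [] B vs (owr r (B v) (bktF k [] v)) = r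
    rw [show bktF k [] v = [] from rfl]
    simp only [owr, List.length_nil, Nat.add_zero, List.append_nil]
    rw [List.take_append_drop]
    exact ih r

theorem ansL_append (k : String → Nat) (M : List String) (B : Nat → Nat) :
    ∀ (vs1 vs2 : List Nat) (r : List String),
    ansL k M B (vs1 ++ vs2) r = ansL k M B vs2 (ansL k M B vs1 r) := by
  intro vs1
  induction vs1 with
  | nil => intro vs2 r; rfl
  | cons v vs ih => intro vs2 r; simp only [List.cons_append]; exact ih vs2 _

theorem ansL_congr (k : String → Nat) (M M' : List String) (B : Nat → Nat) :
    ∀ (vs : List Nat) (r : List String), (∀ v ∈ vs, bktF k M v = bktF k M' v) →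
    ansL k M B vs r = ansL k M' B vs r := by
  intro vs
  induction vs with
  | nil => intro r _; rfl
  | cons v vs ih =>
    intro r h
    show ansL k M B vs _ = ansL k M' B vs _
    rw [h v (by simp), ih _ (fun v hv => h v (by simp [hv]))]

theorem owr_length (r : List String) (s : Nat) (seg : List String)
    (h : s + seg.length ≤ r.length) : (owr r s seg).length = r.length := by
  simp [owr]
  omega

theorem belowF_succ' (k : String → Nat) (L : List String) (v : Nat) :
    belowF k L (v + 1) = cumF k L v := by
  simp only [belowF, cumF]
  apply List.countP_congr
  intro w _
  simp

theorem belowF_mono' (k : String → Nat) (L : List String) {v u : Nat} (h : v ≤ u) :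
    belowF k L v ≤ belowF k L u := by
  apply List.countP_mono_left
  intro w _
  simp only [decide_eq_true_eq]
  omega

theorem owr_set_commute (r : List String) (s p : Nat) (seg : List String) (w : String)
    (h1 : s + seg.length ≤ p) (h2 : p < r.length) :
    owr (r.set p w) s seg = (owr r s seg).set p w := by
  apply List.ext_getElem (by simp [owr])
  intro j hj1 hj2
  have hjl : j < r.length := by simp [owr] at hj1; omega
  simp only [owr, List.getElem_append, List.getElem_set, List.getElem_take, List.getElem_drop,
    List.length_take, List.length_set, List.length_append]
  split_ifs <;> first | rfl | omega

theorem owr_snoc (r : List String) (s : Nat) (seg : List String) (w : String)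
    (h2 : s + seg.length < r.length) :
    owr r s (seg ++ [w]) = owr (r.set (s + seg.length) w) s seg := by
  apply List.ext_getElem (by simp [owr]; omega)
  intro j hj1 hj2
  have hjl : j < r.length := by simp [owr] at hj1; omega
  simp only [owr, List.getElem_append, List.getElem_set, List.getElem_take, List.getElem_drop,
    List.length_take, List.length_set, List.length_append, List.length_singleton,
    List.getElem_singleton]
  have hs : s ≤ r.length := by omega
  simp only [Nat.min_eq_left hs]
  split_ifs <;> first | rfl | omega | (congr 1; omega)

theorem bkt_len (k : String → Nat) (L : List String) (v : Nat) :
    (bktF k L v).length = cntF k L v := by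
  simp only [bktF, cntF]; exact Eq.symm List.countP_eq_length_filter

theorem ansL_length (k : String → Nat) (M : List String) (B : Nat → Nat) :
    ∀ (vs : List Nat) (r : List String),
    (∀ v ∈ vs, B v + cntF k M v ≤ r.length) →
    (ansL k M B vs r).length = r.length := by
  intro vs
  induction vs with
  | nil => intro r _; rfl
  | cons v vs ih =>
    intro r h
    have hv := h v (by simp)
    have hlen : (owr r (B v) (bktF k M v)).length = r.length :=
      owr_length _ _ _ (by rw [bkt_len]; omega)
    show (ansL k M B vs _).length = _
    rw [ih _ (by rw [hlen]; exact fun u hu => h u (by simp [hu])), hlen]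

theorem ansL_set_commute (k : String → Nat) (M : List String) (B : Nat → Nat) :
    ∀ (vs : List Nat) (r : List String) (p : Nat) (w : String),
    (∀ v ∈ vs, B v + cntF k M v ≤ p) → p < r.length →
    ansL k M B vs (r.set p w) = (ansL k M B vs r).set p w := by
  intro vs
  induction vs with
  | nil => intro r p w _ _; rfl
  | cons v vs ih =>
    intro r p w h hp
    have hv := h v (by simp)
    have hfit : B v + (bktF k M v).length ≤ p := by rw [bkt_len]; omega
    show ansL k M B vs (owr (r.set p w) (B v) (bktF k M v)) = _
    rw [owr_set_commute _ _ _ _ _ hfit hp,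
        ih _ _ _ (fun u hu => h u (by simp [hu]))
          (by rw [owr_length _ _ _ (by rw [bkt_len]; omega)]; exact hp)]
    rfl

theorem ansL_snoc (k : String → Nat) (hk : ∀ x, k x < 27)
    (M' S : List String) (w : String) (r : List String)
    (hr : r.length = M'.length + 1 + S.length) :
    ansL k (M' ++ [w]) (belowF k (M' ++ [w] ++ S)) (List.range 27) r
      = ansL k M' (belowF k (M' ++ [w] ++ S)) (List.range 27)
          (r.set (belowF k (M' ++ [w] ++ S) (k w) + cntF k M' (k w)) w) := by
  set T := M' ++ [w] ++ S with hT
  set B := belowF k T with hB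
  set kw := k w with hkw
  set p := B kw + cntF k M' kw with hp
  have hkw27 : kw < 27 := hk w
  have hTlen : T.length = M'.length + 1 + S.length := by simp [hT]; omega
  have hcntT : ∀ v, cntF k T v = cntF k M' v + (if k w = v then 1 else 0) + cntF k S v := by
    intro v; simp [cntF, hT, List.countP_append, List.countP_cons]; omega
  have hcum_le : ∀ v, B v + cntF k T v ≤ r.length := by
    intro v
    have h1 : B v + cntF k T v = cumF k T v := below_add_cnt k T v
    have h2 := cumF_le_len k T v
    omega
  have hfit : ∀ v, B v + cntF k M' v ≤ r.length := by
    intro v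
    have h1 := hcntT v
    have := hcum_le v
    omega
  have hple : ∀ v, v < kw → B v + cntF k M' v ≤ p := by
    intro v hv
    have h1 : B v + cntF k T v = cumF k T v := below_add_cnt k T v
    have h2 : B (v + 1) = cumF k T v := belowF_succ' k T v
    have h3 : B (v + 1) ≤ B kw := belowF_mono' k T (by omega)
    have h4 := hcntT v
    simp only [hp]
    omega
  have hplt : p < r.length := by
    have h1 := hcntT kw
    have h2 := hcum_le kw
    have hif : (if k w = kw then 1 else 0) = 1 := by simp [hkw]
    simp only [hp]
    omega
  have hsplit : List.range 27 = List.range' 0 kw ++ (kw :: List.range' (kw + 1) (26 - kw)) := by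
    rw [List.range_eq_range']
    have h1 : (27 : Nat) = kw + ((26 - kw) + 1) := by omega
    rw [h1, ← List.range'_append (s := 0) (m := kw) (n := (26 - kw) + 1) (step := 1)]
    simp [List.range'_succ]
  have hbkt_ne : ∀ v, v ≠ kw → bktF k (M' ++ [w]) v = bktF k M' v := by
    intro v hv
    simp only [bktF, List.filter_append, List.filter_cons, List.filter_nil]
    have : ¬ (k w == v) = true := by simp [hkw] at *; omega
    simp [this]
  have hbkt_kw : bktF k (M' ++ [w]) kw = bktF k M' kw ++ [w] := by
    simp [bktF, List.filter_append, hkw]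
  have hseg1 : ∀ v ∈ List.range' 0 kw, bktF k (M' ++ [w]) v = bktF k M' v := by
    intro v hv
    have : v < kw := by
      have := List.mem_range'_1.mp hv
      omega
    exact hbkt_ne v (by omega)
  have hseg1p : ∀ v ∈ List.range' 0 kw, B v + cntF k M' v ≤ p := by
    intro v hv
    have := List.mem_range'_1.mp hv
    exact hple v (by omega)
  have hseg1fit : ∀ v ∈ List.range' 0 kw, B v + cntF k M' v ≤ r.length := fun v _ => hfit v
  rw [hsplit, ansL_append, ansL_append,
      ansL_congr k (M' ++ [w]) M' B _ r hseg1,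
      ansL_set_commute k M' B _ r p w hseg1p hplt]
  set X := ansL k M' B (List.range' 0 kw) r with hX
  have hXlen : X.length = r.length := ansL_length k M' B _ r hseg1fit
  show ansL k (M' ++ [w]) B _ (owr X (B kw) (bktF k (M' ++ [w]) kw))
      = ansL k M' B _ (owr (X.set p w) (B kw) (bktF k M' kw))
  rw [hbkt_kw, owr_snoc X (B kw) (bktF k M' kw) w (by rw [bkt_len, hXlen]; omega),
      bkt_len]
  apply ansL_congr
  intro v hv
  have := List.mem_range'_1.mp hv
  exact hbkt_ne v (by omega)

theorem cumF_eq_len (k : String → Nat) (L : List String) (hk : ∀ x, k x < 27) :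
    cumF k L 26 = L.length := by
  simp only [cumF]
  rw [List.countP_eq_length]
  intro w _
  simp only [decide_eq_true_eq]
  have := hk w
  omega

theorem ansL_range' (k : String → Nat) (L : List String) (hk : ∀ x, k x < 27) :
    ∀ (c t : Nat), t + c = 27 → ∀ (r : List String), r.length = L.length →
    ansL k L (belowF k L) (List.range' t c) r
      = r.take (belowF k L t) ++ (List.range' t c).flatMap (bktF k L) := by
  intro c
  induction c with
  | zero =>
    intro t ht r hr
    have h1 : belowF k L t = L.length := by
      have h2 : belowF k L t = cumF k L 26 := by
        have : t = 27 := by omega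
        subst this
        exact belowF_succ' k L 26
      rw [h2, cumF_eq_len k L hk]
    show r = r.take (belowF k L t) ++ []
    rw [h1, List.append_nil, List.take_of_length_le (by omega)]
  | succ c ih =>
    intro t ht r hr
    have hbc : belowF k L t + cntF k L t = cumF k L t := below_add_cnt k L t
    have hcle := cumF_le_len k L t
    have hfit : belowF k L t + (bktF k L t).length ≤ r.length := by
      rw [bkt_len]; omega
    rw [List.range'_succ]
    show ansL k L (belowF k L) (List.range' (t + 1) c) (owr r (belowF k L t) (bktF k L t))
        = _
    rw [ih (t + 1) (by omega) _ (by rw [owr_length _ _ _ hfit]; exact hr)]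
    have hsucc : belowF k L (t + 1) = cumF k L t := belowF_succ' k L t
    have htake : (owr r (belowF k L t) (bktF k L t)).take (belowF k L (t + 1))
        = r.take (belowF k L t) ++ bktF k L t := by
      simp only [owr, hsucc]
      rw [List.take_append, List.take_append]
      have h1 : (r.take (belowF k L t)).length = belowF k L t := by
        rw [List.length_take]; omega
      rw [List.take_of_length_le (l := List.take (belowF k L t) r) (by rw [h1]; omega),
          List.take_of_length_le (l := bktF k L t) (by rw [h1, bkt_len]; omega)]
      rw [List.length_append, h1, bkt_len]
      have h5 : cumF k L t - (belowF k L t + cntF k L t) = 0 := by omega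
      rw [h5]
      simp
    rw [htake]
    simp [List.flatMap_cons, List.append_assoc]

theorem loop1_counts (idx : Int) :
    ∀ (L : List String) (g : Nat → Int),
    (∀ w ∈ L, -27 ≤ csValue idx w ∧ csValue idx w < 27) →
    L.foldl (fun c w =>
        PySem.List.pySetD c (csValue idx w) (PySem.List.pyGetD c (csValue idx w) 0 + 1))
      ((List.range 27).map g)
    = (List.range 27).map (fun v => g v + (cntF (ek idx) L v : Int)) := by
  intro L
  induction L with
  | nil =>
    intro g _
    apply List.map_congr_left
    intro v _
    simp [cntF]
  | cons w t ih =>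
    intro g hb
    have hw := hb w (List.mem_cons_self)
    have hlen : ((List.range 27).map g).length = 27 := by simp
    rw [List.foldl_cons, pyGetD_emod _ hlen _ hw, pySetD_emod _ hlen _ hw,
        show (csValue idx w % 27).toNat = ek idx w from rfl,
        getD_map_range' g 27 _ (ek_lt_27 idx w), set_map_range,
        ih _ (fun x hx => hb x (List.mem_cons_of_mem _ hx))]
    apply List.map_congr_left
    intro v hv
    show (if v = ek idx w then g (ek idx w) + 1 else g v) + (cntF (ek idx) t v : Int)
        = g v + (cntF (ek idx) (w :: t) v : Int)
    have hc : cntF (ek idx) (w :: t) v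
        = cntF (ek idx) t v + (if ek idx w = v then 1 else 0) := by
      simp [cntF, List.countP_cons]
    by_cases h : v = ek idx w
    · subst h; simp at hc ⊢; omega
    · rw [if_neg h] at *
      rw [hc, if_neg (fun hh => h hh.symm)]
      push_cast
      ring

theorem loopB_buckets (idx : Int) :
    ∀ (L : List String) (g : Nat → List String),
    (∀ w ∈ L, -27 ≤ csValue idx w ∧ csValue idx w < 27) →
    L.foldl (fun bs w =>
        PySem.List.pySetD bs (csValue idx w) (PySem.List.pyGetD bs (csValue idx w) [] ++ [w]))
      ((List.range 27).map g)
    = (List.range 27).map (fun v => g v ++ bktF (ek idx) L v) := by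
  intro L
  induction L with
  | nil =>
    intro g _
    apply List.map_congr_left
    intro v _
    simp [bktF]
  | cons w t ih =>
    intro g hb
    have hw := hb w (List.mem_cons_self)
    have hlen : ((List.range 27).map g).length = 27 := by simp
    rw [List.foldl_cons, pyGetD_emod _ hlen _ hw, pySetD_emod _ hlen _ hw,
        show (csValue idx w % 27).toNat = ek idx w from rfl,
        getD_map_range' g 27 _ (ek_lt_27 idx w), set_map_range,
        ih _ (fun x hx => hb x (List.mem_cons_of_mem _ hx))]
    apply List.map_congr_left
    intro v hv
    show (if v = ek idx w then g (ek idx w) ++ [w] else g v) ++ bktF (ek idx) t v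
        = g v ++ bktF (ek idx) (w :: t) v
    have hc : bktF (ek idx) (w :: t) v
        = (if ek idx w = v then [w] else []) ++ bktF (ek idx) t v := by
      simp only [bktF, List.filter_cons]
      split_ifs with h1 h2 <;> simp_all
    by_cases h : v = ek idx w
    · subst h; simp at hc ⊢; simp [hc]
    · rw [if_neg h, hc, if_neg (fun hh => h hh.symm)]
      simp

theorem psum_loop (k : String → Nat) (L : List String) :
    ∀ (d t : Nat) (g : Nat → Int), t + d = 27 → 1 ≤ t →
    (∀ v, v < t → g v = (cumF k L v : Int)) →
    (∀ v, t ≤ v → v < 27 → g v = (cntF k L v : Int)) →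
    (PySem.List.pyRange (t : Int) 27 1).foldl
      (fun c i => PySem.List.pySetD c i (PySem.List.pyGetD c i 0 + PySem.List.pyGetD c (i - 1) 0))
      ((List.range 27).map g)
    = (List.range 27).map (fun v => (cumF k L v : Int)) := by
  intro d
  induction d with
  | zero =>
    intro t g ht _ hcum _
    have h27 : t = 27 := by omega
    subst h27
    rw [PySem.List.pyRange_one_eq_nil (by norm_num)]
    simp only [List.foldl_nil]
    apply List.map_congr_left
    intro v hv
    exact hcum v (by simpa using hv)
  | succ d ih =>
    intro t g ht h1t hcum hcnt
    have ht27 : t < 27 := by omega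
    rw [PySem.List.pyRange_one_cons (by exact_mod_cast ht27), List.foldl_cons]
    have hgett : PySem.List.pyGetD ((List.range 27).map g) (t : Int) 0 = g t := by
      rw [PySem.List.pyGetD_natCast, getD_map_range' g 27 t ht27]
    have hcast : ((t : Int) - 1) = ((t - 1 : Nat) : Int) := by omega
    have hgett1 : PySem.List.pyGetD ((List.range 27).map g) ((t : Int) - 1) 0 = g (t - 1) := by
      rw [hcast, PySem.List.pyGetD_natCast, getD_map_range' g 27 (t - 1) (by omega)]
    rw [hgett, hgett1, PySem.List.pySetD_natCast, set_map_range]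
    have hstep : ((t : Int) + 1) = ((t + 1 : Nat) : Int) := by omega
    rw [hstep, ih (t + 1) _ (by omega) (by omega) ?_ ?_]
    · intro v hv
      by_cases h : v = t
      · subst h
        rw [if_pos rfl, hcum (v - 1) (by omega), hcnt v (by omega) (by omega),
            cumF_pred k L v h1t]
        push_cast
        ring
      · rw [if_neg h]
        exact hcum v (by omega)
    · intro v hv1 hv2
      rw [if_neg (by omega)]
      exact hcnt v (by omega) hv2

theorem ML (idx : Int) :
    ∀ (M S res : List String),
    (∀ w ∈ M, -27 ≤ csValue idx w ∧ csValue idx w < 27) →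
    res.length = M.length + S.length →
    (M.reverse.foldl
      (fun (st : List String × List Int) w =>
        (PySem.List.pySetD st.1 (PySem.List.pyGetD st.2 (csValue idx w) 0 - 1) w,
         PySem.List.pySetD st.2 (csValue idx w) (PySem.List.pyGetD st.2 (csValue idx w) 0 - 1)))
      (res, (List.range 27).map (fun v => ((cumF (ek idx) M v + belowF (ek idx) S v : Nat) : Int))))
    = (ansL (ek idx) M (belowF (ek idx) (M ++ S)) (List.range 27) res,
       (List.range 27).map (fun v => ((belowF (ek idx) (M ++ S) v : Nat) : Int))) := by
  intro M
  induction M using List.reverseRecOn with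
  | nil =>
    intro S res _ _
    simp only [List.reverse_nil, List.foldl_nil, List.nil_append]
    rw [ansL_nil_bkt]
    simp only [Prod.mk.injEq]
    refine ⟨trivial, ?_⟩
    apply List.map_congr_left
    intro v _
    simp [cumF]
  | append_singleton M' w ih =>
    intro S res hb hlen
    have hw := hb w (by simp)
    have hk27 := ek_lt_27 idx
    simp only [List.reverse_append, List.reverse_singleton, List.singleton_append,
      List.foldl_cons]
    have hlen27 : ((List.range 27).map
        (fun v => ((cumF (ek idx) (M' ++ [w]) v + belowF (ek idx) S v : Nat) : Int))).length
        = 27 := by simp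
    rw [pyGetD_emod _ hlen27 _ hw, pySetD_emod _ hlen27 _ hw,
        show (csValue idx w % 27).toNat = ek idx w from rfl,
        getD_map_range' _ 27 _ (hk27 w), set_map_range]
    have hpos1 : 0 < cumF (ek idx) (M' ++ [w]) (ek idx w) := by
      rw [cumF, List.countP_pos_iff]
      exact ⟨w, by simp, by simp⟩
    have hvalcast : ((cumF (ek idx) (M' ++ [w]) (ek idx w)
          + belowF (ek idx) S (ek idx w) : Nat) : Int) - 1
        = ((cumF (ek idx) (M' ++ [w]) (ek idx w)
          + belowF (ek idx) S (ek idx w) - 1 : Nat) : Int) := by push_cast; omega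
    rw [hvalcast, PySem.List.pySetD_natCast]
    have hmap : (List.range 27).map (fun v => if v = ek idx w then
          ((cumF (ek idx) (M' ++ [w]) (ek idx w)
            + belowF (ek idx) S (ek idx w) - 1 : Nat) : Int)
          else ((cumF (ek idx) (M' ++ [w]) v + belowF (ek idx) S v : Nat) : Int))
        = (List.range 27).map
          (fun v => ((cumF (ek idx) M' v + belowF (ek idx) (w :: S) v : Nat) : Int)) := by
      apply List.map_congr_left
      intro v _
      have e1 : cumF (ek idx) (M' ++ [w]) v
          = cumF (ek idx) M' v + (if ek idx w ≤ v then 1 else 0) := by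
        simp only [cumF, List.countP_append, List.countP_cons, List.countP_nil]
        split_ifs <;> simp_all
      have e2 : belowF (ek idx) (w :: S) v
          = (if ek idx w < v then 1 else 0) + belowF (ek idx) S v := by
        simp only [belowF, List.countP_cons]
        split_ifs <;> simp_all
        omega
      by_cases h : v = ek idx w
      · subst h
        rw [if_pos rfl]
        have e1' := e1
        rw [if_pos (le_refl _)] at e1'
        rw [e2, if_neg (lt_irrefl _)]
        have := hpos1
        push_cast
        omega
      · rw [if_neg h, e1, e2]
        have hne : ek idx w ≠ v := fun hh => h hh.symm
        by_cases h2 : ek idx w < v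
        · rw [if_pos h2, if_pos (by omega)]; push_cast; ring
        · rw [if_neg h2, if_neg (by omega)]; push_cast; ring
    rw [hmap, ih (w :: S) _ (fun x hx => hb x (by simp [hx])) (by simp at hlen ⊢; omega)]
    simp only [Prod.mk.injEq]
    constructor
    · have hBeq : belowF (ek idx) (M' ++ w :: S) = belowF (ek idx) (M' ++ [w] ++ S) := by
        funext v
        simp only [belowF, List.countP_append, List.countP_cons, List.countP_nil]
        omega
      rw [hBeq]
      have hposeq : cumF (ek idx) (M' ++ [w]) (ek idx w) + belowF (ek idx) S (ek idx w) - 1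
          = belowF (ek idx) (M' ++ [w] ++ S) (ek idx w) + cntF (ek idx) M' (ek idx w) := by
        have a1 := below_add_cnt (ek idx) M' (ek idx w)
        have a2 : cumF (ek idx) (M' ++ [w]) (ek idx w)
            = cumF (ek idx) M' (ek idx w) + 1 := by
          simp [cumF, List.countP_append]
        have a3 : belowF (ek idx) (M' ++ [w] ++ S) (ek idx w)
            = belowF (ek idx) M' (ek idx w) + belowF (ek idx) S (ek idx w) := by
          simp [belowF, List.countP_append]
        omega
      rw [hposeq]
      exact (ansL_snoc (ek idx) hk27 M' S w res (by simp at hlen ⊢; omega)).symm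
    · apply List.map_congr_left
      intro v _
      have : belowF (ek idx) (M' ++ w :: S) v = belowF (ek idx) (M' ++ [w] ++ S) v := by
        simp only [belowF, List.countP_append, List.countP_cons, List.countP_nil]
        omega
      rw [this]

theorem cumF_zero (k : String → Nat) (L : List String) : cumF k L 0 = cntF k L 0 := by
  simp only [cumF, cntF]
  apply List.countP_congr
  intro w _
  simp

theorem A_side (A : List String) (n idx : Int) (h : Pre_counting_sort_tweaked A n idx) :
    counting_sort_tweaked A n idx
      = (List.range 27).flatMap (bktF (ek idx) (A.take n.toNat)) := by
  obtain ⟨hn, hw⟩ := h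
  have hb : ∀ w ∈ A.take n.toNat, -27 ≤ csValue idx w ∧ csValue idx w < 27 :=
    fun w hww => csValue_bounds_of_pre idx w (hw w hww)
  have hLlen : (A.take n.toNat).length = n.toNat := by
    rw [List.length_take]; omega
  show ((PySem.List.pyRange (n - 1) (-1) (-1)).foldl
      (fun (st : List String × List Int) i =>
        (PySem.List.pySetD st.1
          (PySem.List.pyGetD st.2 (csValue idx (PySem.List.pyGetD A i "")) 0 - 1)
          (PySem.List.pyGetD A i ""),
         PySem.List.pySetD st.2 (csValue idx (PySem.List.pyGetD A i ""))
          (PySem.List.pyGetD st.2 (csValue idx (PySem.List.pyGetD A i "")) 0 - 1)))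
      (List.replicate n.toNat "",
        (PySem.List.pyRange 1 27 1).foldl
          (fun c i => PySem.List.pySetD c i
            (PySem.List.pyGetD c i 0 + PySem.List.pyGetD c (i - 1) 0))
          ((PySem.List.pyRange 0 n 1).foldl
            (fun c i =>
              PySem.List.pySetD c (csValue idx (PySem.List.pyGetD A i ""))
                (PySem.List.pyGetD c (csValue idx (PySem.List.pyGetD A i "")) 0 + 1))
            (List.replicate 27 0)))).1
    = (List.range 27).flatMap (bktF (ek idx) (A.take n.toNat))
  rw [foldl_pyRange_take A n hn
      (fun c w => PySem.List.pySetD c (csValue idx w)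
        (PySem.List.pyGetD c (csValue idx w) 0 + 1)) "" (List.replicate 27 0)]
  have hrep : (List.range 27).map (fun _ => (0 : Int)) = List.replicate 27 0 := by
    simp
  rw [← hrep, loop1_counts idx _ _ hb]
  have hcnt0 : (List.range 27).map (fun v => 0 + (cntF (ek idx) (A.take n.toNat) v : Int))
      = (List.range 27).map (fun v => (cntF (ek idx) (A.take n.toNat) v : Int)) := by
    apply List.map_congr_left
    intro v _
    ring
  rw [hcnt0]
  have hps := psum_loop (ek idx) (A.take n.toNat) 26 1
      (fun v => (cntF (ek idx) (A.take n.toNat) v : Int)) (by omega) (le_refl 1)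
      (by intro v hv
          have : v = 0 := by omega
          subst this
          exact congrArg _ (cumF_zero (ek idx) (A.take n.toNat)).symm)
      (by intro v _ _; rfl)
  norm_num at hps
  rw [hps,
      foldl_pyRange_rev_take A n hn
      (fun (st : List String × List Int) w =>
        (PySem.List.pySetD st.1 (PySem.List.pyGetD st.2 (csValue idx w) 0 - 1) w,
         PySem.List.pySetD st.2 (csValue idx w)
          (PySem.List.pyGetD st.2 (csValue idx w) 0 - 1))) ""
      (List.replicate n.toNat "",
        (List.range 27).map (fun v => (cumF (ek idx) (A.take n.toNat) v : Int)))]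
  have hc2 : (List.range 27).map (fun v => (cumF (ek idx) (A.take n.toNat) v : Int))
      = (List.range 27).map
        (fun v => ((cumF (ek idx) (A.take n.toNat) v + belowF (ek idx) [] v : Nat) : Int)) := by
    apply List.map_congr_left
    intro v _
    simp [belowF]
  rw [hc2, ML idx (A.take n.toNat) [] (List.replicate n.toNat "") hb (by simp [hLlen])]
  show ansL (ek idx) (A.take n.toNat) (belowF (ek idx) (A.take n.toNat ++ []))
      (List.range 27) (List.replicate n.toNat "") = _
  rw [List.append_nil, List.range_eq_range',
      ansL_range' (ek idx) (A.take n.toNat) (ek_lt_27 idx) 27 0 rfl _ (by simp [hLlen])]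
  simp [belowF_zero]

theorem B_side (A : List String) (n idx : Int) (h : Pre_counting_sort_tweaked A n idx) :
    counting_sort_tweaked_alt A n idx
      = (List.range 27).flatMap (bktF (ek idx) (A.take n.toNat)) := by
  obtain ⟨hn, hw⟩ := h
  have hb : ∀ w ∈ A.take n.toNat, -27 ≤ csValue idx w ∧ csValue idx w < 27 :=
    fun w hww => csValue_bounds_of_pre idx w (hw w hww)
  show (((PySem.List.pyRange 0 n 1).foldl
      (fun bs i =>
        PySem.List.pySetD bs (csValue idx (PySem.List.pyGetD A i ""))
          (PySem.List.pyGetD bs (csValue idx (PySem.List.pyGetD A i "")) []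
            ++ [PySem.List.pyGetD A i ""]))
      ((PySem.List.pyRange 0 27 1).map (fun _ => ([] : List String)))).foldl
        (fun r b => r ++ b) [])
    = (List.range 27).flatMap (bktF (ek idx) (A.take n.toNat))
  have hinit : (PySem.List.pyRange 0 27 1).map (fun _ => ([] : List String))
      = (List.range 27).map (fun _ => []) := by
    rw [PySem.List.pyRange_one, List.map_map]
    rfl
  rw [hinit,
      foldl_pyRange_take A n hn
        (fun bs w => PySem.List.pySetD bs (csValue idx w)
          (PySem.List.pyGetD bs (csValue idx w) [] ++ [w])) ""
        ((List.range 27).map (fun _ => [])),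
      loopB_buckets idx _ _ hb]
  have hmap : (List.range 27).map (fun v => [] ++ bktF (ek idx) (A.take n.toNat) v)
      = (List.range 27).map (bktF (ek idx) (A.take n.toNat)) := by
    simp
  rw [hmap, PySem.List.foldl_append_eq_flatten]
  simp [List.flatMap_def]

-- ===== VERDICT (by name: the statement is the Claim_ definition above) =====
theorem counting_sort_tweaked_spec : Claim_equal_counting_sort_tweaked := by
  intro A n idx _ hpre
  unfold Spec_counting_sort_tweaked
  rw [A_side A n idx hpre, B_side A n idx hpre]
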